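-- pv_equiv track=rewrite | github.com/abbasmoosajee07/AdventofCode | 2023/22/2023Day22.py | build_bricks
-- ===== SOURCE A (Python) =====
-- def build_bricks(brick_edges: dict) -> dict:
--     expanded_graph = []
--
--     # Generate coordinates with their corresponding brick names
--     for brick_name, (edge_1, edge_2) in brick_edges.items():
--         # Unpack coordinates for readability and get min/max for each axis
--         (x1, y1, z1), (x2, y2, z2) = edge_1, edge_2
--         min_x, max_x = sorted([x1, x2])
--         min_y, max_y = sorted([y1, y2])
--         min_z, max_z = sorted([z1, z2])
--
--         # Generate all coordinates for the brick
--         expanded_graph.extend([(brick_name, (dx, dy, dz))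
--                                 for dx in range(min_x, max_x + 1)
--                                 for dy in range(min_y, max_y + 1)
--                                 for dz in range(min_z, max_z + 1)])
--
--     # Sort the graph by z-coordinate
--     expanded_graph.sort(key=lambda x: x[1][2])
--
--     # Rebuild the dictionary with sorted coordinates
--     sorted_graph = {}
--     for brick_name, coord in expanded_graph:
--         sorted_graph.setdefault(brick_name, []).append(coord)
--
--     return sorted_graph
-- ===== SOURCE B (Python) =====
-- def build_bricks(brick_edges: dict) -> dict:
--     # Sort the N bricks by their lowest z (stable), then emit each brick's
--     # voxels directly in z-major order -- no global per-voxel sort, no regrouping.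
--     sorted_graph = {}
--     bricks = sorted(brick_edges.items(),
--                     key=lambda kv: min(kv[1][0][2], kv[1][1][2]))
--     for brick_name, ((x1, y1, z1), (x2, y2, z2)) in bricks:
--         xs = range(min(x1, x2), max(x1, x2) + 1)
--         ys = range(min(y1, y2), max(y1, y2) + 1)
--         zs = range(min(z1, z2), max(z1, z2) + 1)
--         sorted_graph[brick_name] = [(dx, dy, dz)
--                                     for dz in zs
--                                     for dx in xs
--                                     for dy in ys]
--     return sorted_graph
-- ===== Notes on version B (the rewrite author's own statement) =====
-- stated objective: faster
-- what changed: Instead of expanding every brick to voxels, stable-sorting the whole voxel list by z and regrouping it into a dict, B stable-sorts only the N bricks by their lowest z and emits each brick's voxel list directly in z-major order.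
import Mathlib
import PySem

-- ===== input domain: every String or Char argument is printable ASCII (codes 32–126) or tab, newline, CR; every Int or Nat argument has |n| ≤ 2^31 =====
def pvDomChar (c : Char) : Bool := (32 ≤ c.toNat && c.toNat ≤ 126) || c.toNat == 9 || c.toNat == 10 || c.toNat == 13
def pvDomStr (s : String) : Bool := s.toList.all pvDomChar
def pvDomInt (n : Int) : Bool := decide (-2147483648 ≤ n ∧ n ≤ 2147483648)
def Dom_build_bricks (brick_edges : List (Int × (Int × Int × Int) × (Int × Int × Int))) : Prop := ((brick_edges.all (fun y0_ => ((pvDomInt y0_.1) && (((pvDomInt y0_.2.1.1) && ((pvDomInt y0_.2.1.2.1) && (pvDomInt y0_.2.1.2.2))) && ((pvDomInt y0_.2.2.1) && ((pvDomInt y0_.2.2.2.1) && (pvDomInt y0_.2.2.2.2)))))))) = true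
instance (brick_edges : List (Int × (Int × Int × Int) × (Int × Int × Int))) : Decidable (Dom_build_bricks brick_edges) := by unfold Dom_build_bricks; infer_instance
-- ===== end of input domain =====

-- B replaces A's global per-voxel stable sort + regrouping pass by sorting only the
-- bricks by lowest z and emitting each brick's voxels directly in z-major order.

-- ===== PORT A =====
-- 'min_v, max_v = sorted([a, b])' (the fallback branch is unreachable: sorted of a 2-list has 2 elements)
def pvMinMax2 (a b : Int) : Int × Int :=
  match PySem.List.sorted [a, b] (fun v => v) false with
  | [lo, hi] => (lo, hi)
  | _ => (a, b)

def build_bricks (brick_edges : List (Int × (Int × Int × Int) × (Int × Int × Int))) : List (Int × List (Int × Int × Int)) :=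
  let expanded_graph : List (Int × (Int × Int × Int)) :=
    (PySem.Dict.ofList brick_edges).items.foldl (fun acc be =>
      let brick_name := be.1
      let x1 := be.2.1.1; let y1 := be.2.1.2.1; let z1 := be.2.1.2.2
      let x2 := be.2.2.1; let y2 := be.2.2.2.1; let z2 := be.2.2.2.2
      let mx := pvMinMax2 x1 x2
      let my := pvMinMax2 y1 y2
      let mz := pvMinMax2 z1 z2
      acc ++ (PySem.List.pyRange mx.1 (mx.2 + 1) 1).flatMap (fun dx =>
        (PySem.List.pyRange my.1 (my.2 + 1) 1).flatMap (fun dy =>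
          (PySem.List.pyRange mz.1 (mz.2 + 1) 1).map (fun dz => (brick_name, (dx, dy, dz)))))) []
  let sorted_graph := PySem.List.sorted expanded_graph (fun t => t.2.2.2) false
  (sorted_graph.foldl (fun d p => d.modify p.1 [] (fun l => l ++ [p.2])) PySem.Dict.empty).items

-- ===== PORT B =====
def build_bricks_alt (brick_edges : List (Int × (Int × Int × Int) × (Int × Int × Int))) : List (Int × List (Int × Int × Int)) :=
  let bricks := PySem.List.sorted (PySem.Dict.ofList brick_edges).items
      (fun kv => min kv.2.1.2.2 kv.2.2.2.2) false
  (bricks.foldl (fun d be =>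
      let x1 := be.2.1.1; let y1 := be.2.1.2.1; let z1 := be.2.1.2.2
      let x2 := be.2.2.1; let y2 := be.2.2.2.1; let z2 := be.2.2.2.2
      let xs := PySem.List.pyRange (min x1 x2) (max x1 x2 + 1) 1
      let ys := PySem.List.pyRange (min y1 y2) (max y1 y2 + 1) 1
      let zs := PySem.List.pyRange (min z1 z2) (max z1 z2 + 1) 1
      d.insert be.1 (zs.flatMap (fun dz =>
        xs.flatMap (fun dx =>
          ys.map (fun dy => (dx, dy, dz)))))) PySem.Dict.empty).items

-- ===== PRECONDITION & SPEC =====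
def Spec_build_bricks (brick_edges : List (Int × (Int × Int × Int) × (Int × Int × Int))) (out : List (Int × List (Int × Int × Int))) : Prop := out = build_bricks_alt brick_edges
instance (brick_edges : List (Int × (Int × Int × Int) × (Int × Int × Int))) (out : List (Int × List (Int × Int × Int))) : Decidable (Spec_build_bricks brick_edges out) := by unfold Spec_build_bricks; infer_instance

-- ===== CLAIM (what is proved, stated in full; the proofs are below) =====
def Claim_equal_build_bricks : Prop := ∀ (brick_edges : List (Int × (Int × Int × Int) × (Int × Int × Int))), Dom_build_bricks brick_edges → Spec_build_bricks brick_edges (build_bricks brick_edges)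


-- ===== LEMMAS AND PROOFS =====

-- generic machinery about PySem's stable insertion sort (Int-valued keys)

theorem pv_insertBy_front {α : Type} (before : α → α → Bool) (x : α) (l : List α)
    (h : ∀ z ∈ l, before x z = true) : PySem.List.insertBy before x l = x :: l := by
  cases l with
  | nil => simp [PySem.List.insertBy]
  | cons y ys => simp [PySem.List.insertBy, h y (by simp)]

theorem pv_filter_insertBy {α : Type} (key : α → Int) (p : α → Bool) (x : α) (l : List α)
    (h : l.Pairwise (fun a b => key a ≤ key b)) :
    (PySem.List.insertBy (fun a b => decide (key a < key b)) x l).filter p =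
      if p x then PySem.List.insertBy (fun a b => decide (key a < key b)) x (l.filter p)
      else l.filter p := by
  induction l with
  | nil => cases hp : p x <;> simp [PySem.List.insertBy, hp]
  | cons y ys ih =>
    have hy : ∀ z ∈ ys, key y ≤ key z := (List.pairwise_cons.mp h).1
    have hys : ys.Pairwise (fun a b => key a ≤ key b) := (List.pairwise_cons.mp h).2
    by_cases hxy : key x < key y
    · have hfront : ∀ z ∈ ys.filter p, (fun a b => decide (key a < key b)) x z = true := by
        intro z hz
        have := hy z (List.mem_of_mem_filter hz)
        simp only [decide_eq_true_eq]
        omega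
      have hfx := pv_insertBy_front (fun a b => decide (key a < key b)) x (ys.filter p) hfront
      cases hp : p x <;> cases hpy : p y <;>
        simp [PySem.List.insertBy, hxy, hp, hpy, hfx]
    · cases hp : p x <;> cases hpy : p y <;>
        simp [PySem.List.insertBy, hxy, hp, hpy, ih hys]

theorem pv_sorted_snoc {α : Type} (xs : List α) (x : α) (key : α → Int) :
    PySem.List.sorted (xs ++ [x]) key =
      PySem.List.insertBy (fun a b => decide (key a < key b)) x (PySem.List.sorted xs key) := by
  rw [PySem.List.sorted_eq_foldl_insertBy, PySem.List.sorted_eq_foldl_insertBy, List.foldl_append]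
  rfl

theorem pv_sorted_filter {α : Type} (key : α → Int) (p : α → Bool) (xs : List α) :
    (PySem.List.sorted xs key).filter p = PySem.List.sorted (xs.filter p) key := by
  induction xs using List.reverseRecOn with
  | nil => rfl
  | append_singleton xs x ih =>
    rw [pv_sorted_snoc, pv_filter_insertBy key p x _ (PySem.List.sorted_pairwise xs key),
      List.filter_append]
    cases hp : p x <;> simp [hp, ih, pv_sorted_snoc]

theorem pv_insertBy_map {α β : Type} (f : α → β) (key : β → Int) (x : α) (l : List α) :
    PySem.List.insertBy (fun a b => decide (key a < key b)) (f x) (l.map f) =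
      (PySem.List.insertBy (fun a b => decide (key (f a) < key (f b))) x l).map f := by
  induction l with
  | nil => simp [PySem.List.insertBy]
  | cons y ys ih =>
    by_cases hxy : key (f x) < key (f y) <;>
      simp [PySem.List.insertBy, hxy, ih]

theorem pv_sorted_map {α β : Type} (f : α → β) (key : β → Int) (xs : List α) :
    PySem.List.sorted (xs.map f) key =
      (PySem.List.sorted xs (fun a => key (f a))).map f := by
  induction xs using List.reverseRecOn with
  | nil => rfl
  | append_singleton xs x ih =>
    rw [List.map_append, List.map_singleton, pv_sorted_snoc, pv_sorted_snoc, ih, pv_insertBy_map]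

theorem pv_sorted_unique {α : Type} (key : α → Int) (ys : List α) :
    ∀ (zs : List α), ys.Pairwise (fun a b => key a ≤ key b) →
      zs.Pairwise (fun a b => key a ≤ key b) →
      (∀ k : Int, ys.filter (fun a => key a == k) = zs.filter (fun a => key a == k)) →
      ys = zs := by
  induction ys with
  | nil =>
    intro zs _ _ hf
    cases zs with
    | nil => rfl
    | cons b zs' =>
      have := hf (key b)
      simp at this
  | cons a ys' ih =>
    intro zs hys hzs hf
    cases zs with
    | nil =>
      have := hf (key a)
      simp at this
    | cons b zs' =>
      have hya : ∀ w ∈ a :: ys', key a ≤ key w := by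
        intro w hw
        rcases List.mem_cons.mp hw with h | h
        · exact le_of_eq (by rw [h])
        · exact (List.pairwise_cons.mp hys).1 w h
      have hzb : ∀ w ∈ b :: zs', key b ≤ key w := by
        intro w hw
        rcases List.mem_cons.mp hw with h | h
        · exact le_of_eq (by rw [h])
        · exact (List.pairwise_cons.mp hzs).1 w h
      have hab : key a = key b := by
        have hmemb : b ∈ (a :: ys').filter (fun w => key w == key b) := by
          rw [hf (key b), List.filter_cons, if_pos (by simp)]
          exact List.mem_cons_self
        have hmema : a ∈ (b :: zs').filter (fun w => key w == key a) := by
          rw [← hf (key a), List.filter_cons, if_pos (by simp)]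
          exact List.mem_cons_self
        have h1 := hya b (List.mem_of_mem_filter hmemb)
        have h2 := hzb a (List.mem_of_mem_filter hmema)
        omega
      have hmain := hf (key a)
      rw [List.filter_cons, List.filter_cons, if_pos (by simp), if_pos (by simp [← hab])] at hmain
      have hheads : a = b := (List.cons.injEq _ _ _ _ ▸ hmain).1
      have htails : ys'.filter (fun w => key w == key a) = zs'.filter (fun w => key w == key a) :=
        (List.cons.injEq _ _ _ _ ▸ hmain).2
      have hrest : ∀ k : Int, ys'.filter (fun w => key w == k) = zs'.filter (fun w => key w == k) := by
        intro k
        by_cases hk : k = key a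
        · rw [hk]; exact htails
        · have := hf k
          rw [List.filter_cons, List.filter_cons,
            if_neg (by simp; omega), if_neg (by simp [← hab]; omega)] at this
          exact this
      rw [hheads, ih zs' (List.pairwise_cons.mp hys).2 (List.pairwise_cons.mp hzs).2 hrest]

theorem pv_pairwise_flatMap {α : Type} (key : α → Int) (Ks : List Int) (g : Int → List α)
    (hKs : Ks.Pairwise (· < ·)) (hg : ∀ k a, a ∈ g k → key a = k) :
    (Ks.flatMap g).Pairwise (fun a b => key a ≤ key b) := by
  induction Ks with
  | nil => simp
  | cons k Ks' ih =>
    rw [List.flatMap_cons]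
    apply List.pairwise_append.mpr
    refine ⟨?_, ih (List.pairwise_cons.mp hKs).2, ?_⟩
    · exact List.pairwise_of_forall_mem_list (fun a ha b hb => by
        rw [hg k a ha, hg k b hb])
    · intro a ha b hb
      rcases List.mem_flatMap.mp hb with ⟨k', hk', hbk'⟩
      rw [hg k a ha, hg k' b hbk']
      exact le_of_lt ((List.pairwise_cons.mp hKs).1 k' hk')

theorem pv_filter_blocks {α : Type} (key : α → Int) (Ks : List Int) (g : Int → List α) (k0 : Int)
    (hKs : Ks.Nodup) (hg : ∀ k a, a ∈ g k → key a = k) :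
    (Ks.flatMap g).filter (fun a => key a == k0) = if k0 ∈ Ks then g k0 else [] := by
  induction Ks with
  | nil => simp
  | cons k Ks' ih =>
    rw [List.flatMap_cons, List.filter_append,
      ih (List.nodup_cons.mp hKs).2]
    by_cases hk : k = k0
    · have hnot : k0 ∉ Ks' := hk ▸ (List.nodup_cons.mp hKs).1
      rw [if_neg hnot, if_pos (by simp [hk]), List.append_nil, hk]
      apply List.filter_eq_self.mpr
      intro a ha
      simp [hg k0 a ha]
    · have hempty : (g k).filter (fun a => key a == k0) = [] := by
        apply List.filter_eq_nil_iff.mpr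
        intro a ha
        simp [hg k a ha, hk]
      rw [hempty, List.nil_append]
      by_cases hmem : k0 ∈ Ks'
      · rw [if_pos hmem, if_pos (List.mem_cons_of_mem _ hmem)]
      · rw [if_neg hmem, if_neg (by
          rw [List.mem_cons]
          rintro (h | h)
          · exact hk h.symm
          · exact hmem h)]

theorem pv_canon {α : Type} (xs : List α) (key : α → Int) :
    PySem.List.sorted xs key =
      (PySem.List.sorted (PySem.Set.ofList (xs.map key)) (fun v => v)).flatMap
        (fun k => xs.filter (fun a => key a == k)) := by
  have hKlt := PySem.List.sorted_ofList_pairwise_lt (xs.map key)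
  have hKnd : (PySem.List.sorted (PySem.Set.ofList (xs.map key)) (fun v => v)).Nodup :=
    hKlt.imp ne_of_lt
  have hg : ∀ (k : Int) (a : α), a ∈ xs.filter (fun a => key a == k) → key a = k := by
    intro k a ha
    simpa using List.of_mem_filter ha
  apply pv_sorted_unique key _ _ (PySem.List.sorted_pairwise xs key)
    (pv_pairwise_flatMap key _ _ hKlt hg)
  intro k0
  rw [pv_sorted_filter, PySem.List.sorted_eq_self_of_pairwise _ _ (by
    apply List.pairwise_of_forall_mem_list
    intro a ha b hb
    rw [hg k0 a ha, hg k0 b hb]),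
    pv_filter_blocks key _ _ k0 hKnd hg]
  by_cases hmem : k0 ∈ xs.map key
  · rw [if_pos]
    rw [(PySem.List.sorted_perm _ _ _).mem_iff, PySem.Set.mem_ofList]
    exact hmem
  · rw [if_neg, List.filter_eq_nil_iff.mpr]
    · intro a ha
      simp only [beq_iff_eq]
      intro h
      exact hmem (h ▸ List.mem_map_of_mem ha)
    · rw [(PySem.List.sorted_perm _ _ _).mem_iff, PySem.Set.mem_ofList]
      exact hmem



-- application-specific helpers (proof-side names for the two programs' pieces)

def pvXmaj (be : Int × (Int × Int × Int) × (Int × Int × Int)) : List (Int × Int × Int) :=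
  (PySem.List.pyRange (min be.2.1.1 be.2.2.1) (max be.2.1.1 be.2.2.1 + 1)).flatMap (fun dx =>
    (PySem.List.pyRange (min be.2.1.2.1 be.2.2.2.1) (max be.2.1.2.1 be.2.2.2.1 + 1)).flatMap (fun dy =>
      (PySem.List.pyRange (min be.2.1.2.2 be.2.2.2.2) (max be.2.1.2.2 be.2.2.2.2 + 1)).map (fun dz =>
        (dx, dy, dz))))

def pvZmaj (be : Int × (Int × Int × Int) × (Int × Int × Int)) : List (Int × Int × Int) :=
  (PySem.List.pyRange (min be.2.1.2.2 be.2.2.2.2) (max be.2.1.2.2 be.2.2.2.2 + 1)).flatMap (fun dz =>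
    (PySem.List.pyRange (min be.2.1.1 be.2.2.1) (max be.2.1.1 be.2.2.1 + 1)).flatMap (fun dx =>
      (PySem.List.pyRange (min be.2.1.2.1 be.2.2.2.1) (max be.2.1.2.1 be.2.2.2.1 + 1)).map (fun dy =>
        (dx, dy, dz))))

def pvMinZ (be : Int × (Int × Int × Int) × (Int × Int × Int)) : Int := min be.2.1.2.2 be.2.2.2.2
def pvMaxZ (be : Int × (Int × Int × Int) × (Int × Int × Int)) : Int := max be.2.1.2.2 be.2.2.2.2

def pvGen (be : Int × (Int × Int × Int) × (Int × Int × Int)) : List (Int × (Int × Int × Int)) :=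
  (pvXmaj be).map (fun c => (be.1, c))

-- first-occurrence dedup of `names` relative to names already `seen`
def pvFresh (seen : List Int) : List Int → List Int
  | [] => []
  | n :: t => if seen.contains n then pvFresh seen t else n :: pvFresh (seen ++ [n]) t

-- basic facts

theorem pv_minMax2_eq (a b : Int) : pvMinMax2 a b = (min a b, max a b) := by
  unfold pvMinMax2
  rw [PySem.List.sorted_eq_foldl_insertBy]
  by_cases h : b < a
  · simp [PySem.List.insertBy, h, min_eq_right h.le, max_eq_left h.le]
  · have hab : a ≤ b := by omega
    simp [PySem.List.insertBy, h, min_eq_left hab, max_eq_right hab]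

theorem pv_pyRange_pairwise (a b : Int) : (PySem.List.pyRange a b).Pairwise (· < ·) := by
  generalize hn : (b - a).toNat = n
  induction n generalizing a with
  | zero =>
    have hnil : PySem.List.pyRange a b = [] := by
      rw [List.eq_nil_iff_forall_not_mem]
      intro x hx
      rw [PySem.List.mem_pyRange_one] at hx
      omega
    rw [hnil]
    exact List.Pairwise.nil
  | succ n ih =>
    have hab : a < b := by omega
    rw [PySem.List.pyRange_one_cons hab]
    refine List.pairwise_cons.mpr ⟨?_, ih (a + 1) (by omega)⟩
    intro x hx
    rw [PySem.List.mem_pyRange_one] at hx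
    omega

theorem pv_filter_strict (l : List Int) (k : Int) (h : l.Pairwise (· < ·)) :
    l.filter (fun x => x == k) = if k ∈ l then [k] else [] := by
  induction l with
  | nil => simp
  | cons x t ih =>
    have hx : ∀ y ∈ t, x < y := (List.pairwise_cons.mp h).1
    have ht := ih (List.pairwise_cons.mp h).2
    by_cases hxk : x = k
    · subst hxk
      have hkt : x ∉ t := fun hm => lt_irrefl x (hx x hm)
      rw [List.filter_cons, if_pos (by simp), ht, if_neg hkt,
        if_pos List.mem_cons_self]
    · rw [List.filter_cons, if_neg (by simpa using hxk), ht]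
      by_cases hkt : k ∈ t
      · rw [if_pos hkt, if_pos (List.mem_cons_of_mem _ hkt)]
      · rw [if_neg hkt, if_neg (by
          rw [List.mem_cons]
          rintro (hh | hh)
          · exact hxk hh.symm
          · exact hkt hh)]

theorem pv_strict_sorted_eq (l1 l2 : List Int) (h1 : l1.Pairwise (· < ·))
    (h2 : l2.Pairwise (· < ·)) (hm : ∀ x, x ∈ l1 ↔ x ∈ l2) : l1 = l2 := by
  have n1 : l1.Nodup := h1.imp (fun hl => ne_of_lt hl)
  have n2 : l2.Nodup := h2.imp (fun hl => ne_of_lt hl)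
  have hp : l2.Perm l1 := (List.perm_ext_iff_of_nodup n2 n1).mpr (fun a => (hm a).symm)
  exact (PySem.List.sorted_eq_self_of_pairwise l1 (fun x => x) (h1.imp (fun hl => le_of_lt hl))).symm.trans
    (PySem.List.sorted_eq_of_perm_of_pairwise_lt l1 l2 (fun x => x) hp h2)

theorem pv_xmaj_z_mem (be : Int × (Int × Int × Int) × (Int × Int × Int)) (c : Int × Int × Int)
    (h : c ∈ pvXmaj be) : pvMinZ be ≤ c.2.2 ∧ c.2.2 ≤ pvMaxZ be := by
  simp only [pvXmaj, List.mem_flatMap, List.mem_map] at h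
  obtain ⟨dx, _, dy, _, dz, hdz, hc⟩ := h
  rw [PySem.List.mem_pyRange_one] at hdz
  subst hc
  simp only [pvMinZ, pvMaxZ]
  omega

theorem pv_xmaj_z_iff (be : Int × (Int × Int × Int) × (Int × Int × Int)) (k : Int) :
    (∃ c ∈ pvXmaj be, c.2.2 = k) ↔ (pvMinZ be ≤ k ∧ k ≤ pvMaxZ be) := by
  constructor
  · rintro ⟨c, hc, hk⟩
    rw [← hk]
    exact pv_xmaj_z_mem be c hc
  · rintro ⟨h1, h2⟩
    refine ⟨(min be.2.1.1 be.2.2.1, min be.2.1.2.1 be.2.2.2.1, k), ?_, rfl⟩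
    have hx := min_le_max (a := be.2.1.1) (b := be.2.2.1)
    have hy := min_le_max (a := be.2.1.2.1) (b := be.2.2.2.1)
    simp only [pvXmaj, List.mem_flatMap, List.mem_map]
    refine ⟨min be.2.1.1 be.2.2.1, ?_, min be.2.1.2.1 be.2.2.2.1, ?_, k, ?_, rfl⟩ <;>
      rw [PySem.List.mem_pyRange_one] <;> simp only [pvMinZ, pvMaxZ] at h1 h2 <;> omega

-- per-brick: stable z-sort of the x-major voxel list is the z-major voxel list
theorem pv_sorted_xmaj (be : Int × (Int × Int × Int) × (Int × Int × Int)) :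
    PySem.List.sorted (pvXmaj be) (fun c => c.2.2) = pvZmaj be := by
  rw [pv_canon (pvXmaj be) (fun c => c.2.2)]
  have hKs : PySem.List.sorted (PySem.Set.ofList ((pvXmaj be).map (fun c => c.2.2))) (fun v => v) =
      PySem.List.pyRange (pvMinZ be) (pvMaxZ be + 1) := by
    apply pv_strict_sorted_eq _ _ (PySem.List.sorted_ofList_pairwise_lt _)
      (pv_pyRange_pairwise _ _)
    intro x
    rw [(PySem.List.sorted_perm _ _ _).mem_iff, PySem.Set.mem_ofList,
      PySem.List.mem_pyRange_one]
    constructor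
    · intro hx
      rcases List.mem_map.mp hx with ⟨c, hc, hcx⟩
      have := pv_xmaj_z_mem be c hc
      omega
    · intro hx
      rcases (pv_xmaj_z_iff be x).mpr (by omega) with ⟨c, hc, hcx⟩
      exact List.mem_map.mpr ⟨c, hc, hcx⟩
  rw [hKs]
  simp only [pvZmaj, pvMinZ, pvMaxZ]
  apply List.flatMap_congr
  intro k hk
  have hz : (PySem.List.pyRange (min be.2.1.2.2 be.2.2.2.2) (max be.2.1.2.2 be.2.2.2.2 + 1)).filter
      (fun dz => dz == k) = [k] := by
    rw [pv_filter_strict _ k (pv_pyRange_pairwise _ _), if_pos]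
    simpa [pvMinZ, pvMaxZ] using hk
  rw [pvXmaj, List.filter_flatMap]
  apply List.flatMap_congr
  intro dx _
  rw [List.filter_flatMap, List.map_eq_flatMap]
  apply List.flatMap_congr
  intro dy _
  rw [List.filter_map,
    show ((fun c : Int × Int × Int => c.2.2 == k) ∘ fun dz => (dx, dy, dz)) =
      (fun dz : Int => dz == k) from rfl, hz]
  rfl

-- Dict facts

theorem pv_keys_insert {ν : Type} (d : PySem.Dict Int ν) (k : Int) (v : ν) :
    (d.insert k v).items.map (fun p => p.1) =
      if d.contains k then d.items.map (fun p => p.1) else d.items.map (fun p => p.1) ++ [k] := by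
  by_cases hc : d.contains k
  · rw [if_pos hc]
    simp only [PySem.Dict.insert, if_pos hc, List.map_map]
    apply List.map_congr_left
    intro p _
    by_cases hp : p.1 == k
    · simp only [Function.comp, if_pos hp]
      exact (beq_iff_eq.mp hp).symm
    · simp [Function.comp, hp]
  · rw [if_neg hc]
    simp [PySem.Dict.insert, hc]

theorem pv_not_mem_keys_of_not_contains {ν : Type} (d : PySem.Dict Int ν) (k : Int)
    (h : ¬ d.contains k = true) : k ∉ d.items.map (fun p => p.1) := by
  intro hm
  rcases List.mem_map.mp hm with ⟨p, hp, hpk⟩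
  exact h (List.any_eq_true.mpr ⟨p, hp, by simp [hpk]⟩)

theorem pv_nodup_keys_foldl {ν : Type} (l : List (Int × ν)) :
    ∀ (d : PySem.Dict Int ν), (d.items.map (fun p => p.1)).Nodup →
      ((l.foldl (fun acc p => acc.insert p.1 p.2) d).items.map (fun p => p.1)).Nodup := by
  induction l with
  | nil => intro d hd; exact hd
  | cons p t ih =>
    intro d hd
    rw [List.foldl_cons]
    apply ih
    rw [pv_keys_insert]
    by_cases hc : d.contains p.1
    · rw [if_pos hc]; exact hd
    · rw [if_neg hc]
      rw [List.nodup_append]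
      refine ⟨hd, by simp, ?_⟩
      intro a ha b hbm
      rw [List.mem_singleton] at hbm
      subst hbm
      intro hab
      subst hab
      exact pv_not_mem_keys_of_not_contains d p.1 hc ha

theorem pv_nodup_keys_ofList {ν : Type} (l : List (Int × ν)) :
    ((PySem.Dict.ofList l).items.map (fun p => p.1)).Nodup := by
  simp only [PySem.Dict.ofList, PySem.Dict.update]
  exact pv_nodup_keys_foldl l PySem.Dict.empty (by simp [PySem.Dict.empty])

theorem pv_find?_of_mem {ν : Type} (k : Int) (v : ν) :
    ∀ (its : List (Int × ν)), (its.map (fun p => p.1)).Nodup → (k, v) ∈ its →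
      its.find? (fun p => p.1 == k) = some (k, v) := by
  intro its
  induction its with
  | nil => intro _ hm; exact absurd hm (List.not_mem_nil)
  | cons p t ih =>
    intro hnd hm
    by_cases hp : p.1 == k
    · have hpk : p = (k, v) := by
        rcases List.mem_cons.mp hm with h | h
        · exact h.symm
        · exfalso
          have : k ∈ t.map (fun p => p.1) := List.mem_map.mpr ⟨(k, v), h, rfl⟩
          rw [List.map_cons, List.nodup_cons] at hnd
          exact hnd.1 ((beq_iff_eq.mp hp) ▸ this)
      subst hpk
      exact List.find?_cons_of_pos (by simp)
    · have hm' : (k, v) ∈ t := by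
        rcases List.mem_cons.mp hm with h | h
        · rw [← h] at hp
          simp at hp
        · exact h
      have hp' : (p.1 == k) = false := by simpa using hp
      rw [List.find?_cons, hp']
      exact ih (by rw [List.map_cons, List.nodup_cons] at hnd; exact hnd.2) hm'

theorem pv_get?_of_mem {ν : Type} (d : PySem.Dict Int ν) (k : Int) (v : ν)
    (hnd : (d.items.map (fun p => p.1)).Nodup) (hm : (k, v) ∈ d.items) :
    d.get? k = some v := by
  rw [PySem.Dict.get?, pv_find?_of_mem k v d.items hnd hm]
  rfl

theorem pv_get?_of_not_contains {ν : Type} (d : PySem.Dict Int ν) (k : Int)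
    (h : ¬ d.contains k = true) : d.get? k = none := by
  rw [PySem.Dict.get?, List.find?_eq_none.mpr, Option.map_none]
  intro p hp hpk
  exact h (List.any_eq_true.mpr ⟨p, hp, hpk⟩)

-- pvFresh facts

theorem pv_fresh_mem (seen l : List Int) (n : Int) (h : n ∈ pvFresh seen l) :
    n ∉ seen ∧ n ∈ l := by
  induction l generalizing seen with
  | nil => exact absurd h (List.not_mem_nil)
  | cons x t ih =>
    by_cases hc : seen.contains x
    · rw [pvFresh, if_pos hc] at h
      have := ih seen h
      exact ⟨this.1, List.mem_cons_of_mem _ this.2⟩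
    · rw [pvFresh, if_neg hc] at h
      rcases List.mem_cons.mp h with rfl | h'
      · exact ⟨by simpa using hc, List.mem_cons_self⟩
      · have := ih (seen ++ [x]) h'
        refine ⟨fun hn => this.1 (List.mem_append_left _ hn), List.mem_cons_of_mem _ this.2⟩

theorem pv_fresh_append (seen l1 l2 : List Int) :
    pvFresh seen (l1 ++ l2) = pvFresh seen l1 ++ pvFresh (seen ++ pvFresh seen l1) l2 := by
  induction l1 generalizing seen with
  | nil => simp [pvFresh]
  | cons x t ih =>
    by_cases hc : seen.contains x
    · rw [List.cons_append, pvFresh, if_pos hc, pvFresh, if_pos hc, ih]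
    · rw [List.cons_append, pvFresh, if_neg hc, pvFresh, if_neg hc, ih,
        List.cons_append, List.append_assoc]
      simp

theorem pv_fresh_const (seen : List Int) (l : List Int) (n : Int) (hall : ∀ x ∈ l, x = n) :
    pvFresh seen l = if l = [] ∨ n ∈ seen then [] else [n] := by
  induction l generalizing seen with
  | nil => simp [pvFresh]
  | cons x t ih =>
    have hx : x = n := hall x List.mem_cons_self
    subst hx
    by_cases hc : seen.contains x
    · rw [pvFresh, if_pos hc, ih seen (fun y hy => hall y (List.mem_cons_of_mem _ hy)),
        if_pos (Or.inr (by simpa using hc))]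
      by_cases ht : t = [] <;> simp [ht, (by simpa using hc : x ∈ seen)]
    · rw [pvFresh, if_neg hc,
        ih (seen ++ [x]) (fun y hy => hall y (List.mem_cons_of_mem _ hy)),
        if_pos (Or.inr (by simp))]
      simp [(by simpa using hc : x ∉ seen)]

-- grouping loop of A: dict built by setdefault-append over a stream

theorem pv_mem_keys_iff (ν : Type) (d : PySem.Dict Int ν) (k : Int) :
    k ∈ d.items.map (fun p => p.1) ↔ d.contains k = true := by
  constructor
  · intro hm
    rcases List.mem_map.mp hm with ⟨p, hp, hpk⟩
    exact List.any_eq_true.mpr ⟨p, hp, by simp [hpk]⟩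
  · intro hcon
    rcases List.any_eq_true.mp hcon with ⟨p, hp, hpk⟩
    exact List.mem_map.mpr ⟨p, hp, beq_iff_eq.mp hpk⟩

theorem pv_group_inv (S : List (Int × (Int × Int × Int))) :
    ∀ (d : PySem.Dict Int (List (Int × Int × Int))), (d.items.map (fun p => p.1)).Nodup →
    (S.foldl (fun d p => d.modify p.1 [] (fun l => l ++ [p.2])) d).items =
      d.items.map (fun q => (q.1, q.2 ++ (S.filter (fun r => r.1 == q.1)).map (fun r => r.2)))
      ++ (pvFresh (d.items.map (fun p => p.1)) (S.map (fun r => r.1))).map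
          (fun n => (n, (S.filter (fun r => r.1 == n)).map (fun r => r.2))) := by
  induction S with
  | nil =>
    intro d hd
    simp [pvFresh]
  | cons pc S' ih =>
    intro d hd
    rw [List.foldl_cons]
    have hstep : d.modify pc.1 [] (fun l => l ++ [pc.2]) =
        d.insert pc.1 (d.getD pc.1 [] ++ [pc.2]) := rfl
    by_cases hc : d.contains pc.1
    · -- key already present: the entry is extended in place
      have hkeys : (d.insert pc.1 (d.getD pc.1 [] ++ [pc.2])).items.map (fun p => p.1) =
          d.items.map (fun p => p.1) := by
        rw [pv_keys_insert, if_pos hc]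
      rw [hstep, ih _ (by rw [hkeys]; exact hd), hkeys]
      congr 1
      · -- the per-entry part
        simp only [PySem.Dict.insert, if_pos hc, List.map_map]
        apply List.map_congr_left
        intro p hp
        by_cases hpk : p.1 == pc.1
        · have hpe : p.1 = pc.1 := beq_iff_eq.mp hpk
          have hget : d.getD pc.1 [] = p.2 := by
            rw [PySem.Dict.getD, pv_get?_of_mem d pc.1 p.2 hd (by rw [← hpe, Prod.mk.eta]; exact hp)]
            rfl
          have hget' : d.getD p.1 [] = p.2 := by rw [hpe]; exact hget
          have hpk' : (pc.1 == p.1) = true := by simp [hpe]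
          simp [Function.comp, hpk, hpk']
          exact ⟨hpe.symm, by rw [hget, hpe]⟩
        · have hpe : ¬ pc.1 == p.1 := fun h => hpk (by simp [beq_iff_eq.mp h])
          simp only [Function.comp, if_neg hpk, List.filter_cons, if_neg hpe]
      · -- the fresh part
        rw [List.map_cons, pvFresh,
          if_pos (by
            rw [List.contains_iff_mem]
            exact (pv_mem_keys_iff _ d pc.1).mpr hc)]
        apply List.map_congr_left
        intro n hn
        have hns : n ∉ d.items.map (fun p => p.1) := (pv_fresh_mem _ _ _ hn).1
        have hne : ¬ pc.1 == n := by
          intro h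
          exact hns ((beq_iff_eq.mp h) ▸ (pv_mem_keys_iff _ d pc.1).mpr hc)
        rw [List.filter_cons, if_neg hne]
    · -- fresh key: a new entry is appended
      have hget : d.getD pc.1 [] = [] := by
        rw [PySem.Dict.getD, pv_get?_of_not_contains d pc.1 hc]
        rfl
      have hitems : (d.insert pc.1 (d.getD pc.1 [] ++ [pc.2])).items =
          d.items ++ [(pc.1, [pc.2])] := by
        simp [PySem.Dict.insert, hc, hget]
      have hkeys : (d.insert pc.1 (d.getD pc.1 [] ++ [pc.2])).items.map (fun p => p.1) =
          d.items.map (fun p => p.1) ++ [pc.1] := by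
        rw [pv_keys_insert, if_neg hc]
      have hnd' : ((d.insert pc.1 (d.getD pc.1 [] ++ [pc.2])).items.map (fun p => p.1)).Nodup := by
        rw [hkeys, List.nodup_append]
        refine ⟨hd, by simp, ?_⟩
        intro a ha b hbm
        rw [List.mem_singleton] at hbm
        subst hbm
        intro hab
        subst hab
        exact pv_not_mem_keys_of_not_contains d pc.1 hc ha
      have hA : ∀ p ∈ d.items, ¬ ((pc.1 == p.1) = true) := by
        intro p hp h
        exact hc ((pv_mem_keys_iff _ d pc.1).mp
          ((beq_iff_eq.mp h) ▸ List.mem_map_of_mem hp))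
      rw [hstep, ih _ hnd', hitems]
      simp only [List.map_append, List.map_singleton]
      rw [List.map_cons, pvFresh, if_neg (by
          rw [List.contains_iff_mem]
          intro hm
          exact hc ((pv_mem_keys_iff _ d pc.1).mp hm))]
      have e1 : d.items.map (fun q => (q.1, q.2 ++
            (((pc :: S').filter (fun r => r.1 == q.1)).map (fun r => r.2)))) =
          d.items.map (fun q => (q.1, q.2 ++
            ((S'.filter (fun r => r.1 == q.1)).map (fun r => r.2)))) := by
        apply List.map_congr_left
        intro p hp
        rw [List.filter_cons, if_neg (hA p hp)]
      have e2 : (pc :: S').filter (fun r => r.1 == pc.1) = pc :: S'.filter (fun r => r.1 == pc.1) := by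
        rw [List.filter_cons, if_pos (by simp)]
      have e3 : (pvFresh (d.items.map (fun p => p.1) ++ [pc.1]) (S'.map (fun r => r.1))).map
            (fun n => (n, (((pc :: S').filter (fun r => r.1 == n)).map (fun r => r.2)))) =
          (pvFresh (d.items.map (fun p => p.1) ++ [pc.1]) (S'.map (fun r => r.1))).map
            (fun n => (n, ((S'.filter (fun r => r.1 == n)).map (fun r => r.2)))) := by
        apply List.map_congr_left
        intro n hn
        have hns := (pv_fresh_mem _ _ _ hn).1
        have hne : ¬ ((pc.1 == n) = true) := by
          intro h
          exact hns (List.mem_append_right _ (by simp [beq_iff_eq.mp h]))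
        rw [List.filter_cons, if_neg hne]
      rw [List.map_cons, e1, e2, e3]
      simp [List.append_assoc]


-- B's loop: dict built by inserting distinct fresh keys

theorem pv_items_foldl_insert {ν : Type} (v : (Int × (Int × Int × Int) × (Int × Int × Int)) → ν) :
    ∀ (l : List (Int × (Int × Int × Int) × (Int × Int × Int))) (d : PySem.Dict Int ν),
      (∀ be ∈ l, ¬ d.contains be.1 = true) → (l.map (fun p => p.1)).Nodup →
      ((l.foldl (fun acc be => acc.insert be.1 (v be)) d).items) =
        d.items ++ l.map (fun be => (be.1, v be)) := by
  intro l
  induction l with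
  | nil => intro d _ _; simp
  | cons be t ih =>
    intro d hfresh hnd
    have hc : ¬ d.contains be.1 = true := hfresh be List.mem_cons_self
    have hitems : (d.insert be.1 (v be)).items = d.items ++ [(be.1, v be)] := by
      simp [PySem.Dict.insert, hc]
    have hbe : be.1 ∉ t.map (fun p => p.1) := by
      rw [List.map_cons, List.nodup_cons] at hnd
      exact hnd.1
    rw [List.foldl_cons, ih (d.insert be.1 (v be)) (by
        intro b hb hcon
        rcases List.any_eq_true.mp hcon with ⟨p, hp, hpk⟩
        rw [hitems] at hp
        rcases List.mem_append.mp hp with hp' | hp'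
        · exact hfresh b (List.mem_cons_of_mem _ hb) (List.any_eq_true.mpr ⟨p, hp', hpk⟩)
        · rw [List.mem_singleton] at hp'
          subst hp'
          exact hbe ((beq_iff_eq.mp hpk) ▸ List.mem_map_of_mem hb))
      (by rw [List.map_cons, List.nodup_cons] at hnd; exact hnd.2), hitems]
    simp

-- the name-order argument

theorem pv_fresh_block (k : Int) :
    ∀ (its : List (Int × (Int × Int × Int) × (Int × Int × Int))) (s : List Int),
      (its.map (fun p => p.1)).Nodup →
      (∀ be ∈ its, ((pvXmaj be).filter (fun c => c.2.2 == k)) ≠ [] → pvMinZ be ≠ k → be.1 ∈ s) →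
      (∀ be ∈ its, pvMinZ be = k → be.1 ∉ s) →
      pvFresh s (its.flatMap (fun be => ((pvXmaj be).filter (fun c => c.2.2 == k)).map (fun _ => be.1))) =
        (its.filter (fun be => pvMinZ be == k)).map (fun p => p.1) := by
  intro its
  induction its with
  | nil => intro s _ _ _; simp [pvFresh]
  | cons be t ih =>
    intro s hnd h1 h2
    rw [List.map_cons, List.nodup_cons] at hnd
    rw [List.flatMap_cons, pv_fresh_append]
    have hconst : ∀ x ∈ ((pvXmaj be).filter (fun c => c.2.2 == k)).map
        (fun _ => be.1), x = be.1 := by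
      intro x hx
      rcases List.mem_map.mp hx with ⟨_, _, hq⟩
      exact hq.symm
    have hfc := pv_fresh_const s _ be.1 hconst
    by_cases hmz : pvMinZ be = k
    · have hW : (pvXmaj be).filter (fun c => c.2.2 == k) ≠ [] := by
        rcases (pv_xmaj_z_iff be k).mpr ⟨le_of_eq hmz, by
          rw [← hmz]; exact min_le_max⟩ with ⟨c, hc, hz⟩
        exact List.ne_nil_of_mem (List.mem_filter.mpr ⟨hc, by simp [hz]⟩)
      have hs : be.1 ∉ s := h2 be List.mem_cons_self hmz
      rw [hfc, if_neg (by
        rintro (h | h)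
        · exact hW (by simpa using h)
        · exact hs h)]
      rw [ih (s ++ [be.1]) hnd.2
        (fun b hb hWb hmb => List.mem_append_left _ (h1 b (List.mem_cons_of_mem _ hb) hWb hmb))
        (fun b hb hmb => by
          intro hmem
          rcases List.mem_append.mp hmem with hm' | hm'
          · exact h2 b (List.mem_cons_of_mem _ hb) hmb hm'
          · rw [List.mem_singleton] at hm'
            exact hnd.1 (hm' ▸ List.mem_map_of_mem hb))]
      rw [List.filter_cons, if_pos (by simp [hmz]), List.map_cons]
      rfl
    · have hskip : pvFresh s (((pvXmaj be).filter (fun c => c.2.2 == k)).map (fun _ => be.1)) = [] := by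
        by_cases hW : (pvXmaj be).filter (fun c => c.2.2 == k) = []
        · rw [hW]; rfl
        · rw [hfc, if_pos (Or.inr (h1 be List.mem_cons_self hW hmz))]
      rw [hskip, List.append_nil, ih s hnd.2
        (fun b hb hWb hmb => h1 b (List.mem_cons_of_mem _ hb) hWb hmb)
        (fun b hb hmb => h2 b (List.mem_cons_of_mem _ hb) hmb),
        List.filter_cons, if_neg (by simp [hmz]), List.nil_append]

theorem pv_names_loop (items : List (Int × (Int × Int × Int) × (Int × Int × Int)))
    (hnd : (items.map (fun p => p.1)).Nodup) :
    ∀ (Ks : List Int) (s : List Int), Ks.Pairwise (· < ·) →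
      (∀ be ∈ items, pvMinZ be ∈ Ks → be.1 ∉ s) →
      (∀ be ∈ items, pvMinZ be ∉ Ks → (∀ k ∈ Ks, ¬ (pvMinZ be ≤ k)) ∨ be.1 ∈ s) →
      pvFresh s (Ks.flatMap (fun k =>
          items.flatMap (fun be => ((pvXmaj be).filter (fun c => c.2.2 == k)).map (fun _ => be.1)))) =
        Ks.flatMap (fun k => (items.filter (fun be => pvMinZ be == k)).map (fun p => p.1)) := by
  intro Ks
  induction Ks with
  | nil => intro s _ _ _; rfl
  | cons k t ih =>
    intro s hpw hfresh hin
    have hpw' := List.pairwise_cons.mp hpw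
    rw [List.flatMap_cons, List.flatMap_cons, pv_fresh_append]
    have hblock : pvFresh s (items.flatMap
        (fun be => ((pvXmaj be).filter (fun c => c.2.2 == k)).map (fun _ => be.1))) =
        (items.filter (fun be => pvMinZ be == k)).map (fun p => p.1) := by
      apply pv_fresh_block k items s hnd
      · intro be hbe hW hmz
        have hle : pvMinZ be ≤ k := by
          have hne := List.exists_mem_of_ne_nil _ hW
          rcases hne with ⟨c, hc⟩
          have hcm := List.mem_filter.mp hc
          have := (pv_xmaj_z_iff be k).mp ⟨c, hcm.1, by simpa using hcm.2⟩
          exact this.1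
        have hnot : pvMinZ be ∉ k :: t := by
          rw [List.mem_cons]
          rintro (h | h)
          · exact hmz h
          · have := hpw'.1 _ h
            omega
        rcases hin be hbe hnot with hleft | hright
        · exact absurd hle (hleft k List.mem_cons_self)
        · exact hright
      · intro be hbe hmz
        exact hfresh be hbe (by rw [List.mem_cons]; exact Or.inl hmz)
    rw [hblock]
    congr 1
    apply ih (s ++ (items.filter (fun be => pvMinZ be == k)).map (fun p => p.1)) hpw'.2
    · intro be hbe hmt
      have hkm : k < pvMinZ be := hpw'.1 _ hmt
      intro hmem
      rcases List.mem_append.mp hmem with hm' | hm'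
      · exact hfresh be hbe (List.mem_cons_of_mem _ hmt) hm'
      · rcases List.mem_map.mp hm' with ⟨b', hb', hb'e⟩
        have hbf := List.mem_filter.mp hb'
        have : b' = be := List.inj_on_of_nodup_map hnd hbf.1 hbe hb'e
        subst this
        have : pvMinZ b' = k := by simpa using hbf.2
        omega
    · intro be hbe hnot
      by_cases hmz : pvMinZ be = k
      · refine Or.inr (List.mem_append_right _ ?_)
        exact List.mem_map_of_mem (List.mem_filter.mpr ⟨hbe, by simp [hmz]⟩)
      · have hnot' : pvMinZ be ∉ k :: t := by
          rw [List.mem_cons]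
          rintro (h | h)
          · exact hmz h
          · exact hnot h
        rcases hin be hbe hnot' with hleft | hright
        · exact Or.inl (fun k' hk' => hleft k' (List.mem_cons_of_mem _ hk'))
        · exact Or.inr (List.mem_append_left _ hright)

-- assembly

theorem pv_flatMap_drop_empty {α : Type} (Ks : List Int) (Ms : List Int) (g : Int → List α)
    (h : ∀ k ∈ Ks, k ∉ Ms → g k = []) :
    Ks.flatMap g = (Ks.filter (fun k => decide (k ∈ Ms))).flatMap g := by
  induction Ks with
  | nil => rfl
  | cons k t ih =>
    rw [List.flatMap_cons, List.filter_cons]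
    by_cases hm : k ∈ Ms
    · rw [if_pos (by simpa using hm), List.flatMap_cons,
        ih (fun k' hk' => h k' (List.mem_cons_of_mem _ hk'))]
    · rw [if_neg (by simpa using hm), h k List.mem_cons_self hm, List.nil_append,
        ih (fun k' hk' => h k' (List.mem_cons_of_mem _ hk'))]

theorem pv_flatMap_single {ν : Type}
    (g : (Int × (Int × Int × Int) × (Int × Int × Int)) → List ν) :
    ∀ (its : List (Int × (Int × Int × Int) × (Int × Int × Int)))
      (be : Int × (Int × Int × Int) × (Int × Int × Int)),
      (its.map (fun p => p.1)).Nodup → be ∈ its →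
      its.flatMap (fun b => if b.1 == be.1 then g b else []) = g be := by
  intro its
  induction its with
  | nil => intro be _ hm; exact absurd hm (List.not_mem_nil)
  | cons b t ih =>
    intro be hnd hm
    rw [List.map_cons, List.nodup_cons] at hnd
    rw [List.flatMap_cons]
    by_cases hb : b.1 == be.1
    · have hbe : b = be := by
        rcases List.mem_cons.mp hm with h | h
        · exact h.symm
        · exact absurd ((beq_iff_eq.mp hb) ▸ List.mem_map_of_mem h) hnd.1
      subst hbe
      have hz : t.flatMap (fun b' => if b'.1 == b.1 then g b' else []) = [] := by
        apply List.flatMap_eq_nil_iff.mpr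
        intro b' hb'
        rw [if_neg]
        intro hbk
        exact hnd.1 (by rw [← beq_iff_eq.mp hbk]; exact List.mem_map_of_mem hb')
      rw [if_pos hb, hz, List.append_nil]
    · have hm' : be ∈ t := by
        rcases List.mem_cons.mp hm with h | h
        · exact absurd (by rw [h]; simp) hb
        · exact h
      rw [if_neg hb, List.nil_append, ih be hnd.2 hm']

def pvItems (brick_edges : List (Int × (Int × Int × Int) × (Int × Int × Int))) :
    List (Int × (Int × Int × Int) × (Int × Int × Int)) :=
  (PySem.Dict.ofList brick_edges).items

def pvL (x : List (Int × (Int × Int × Int) × (Int × Int × Int))) : List (Int × (Int × Int × Int)) :=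
  (pvItems x).flatMap pvGen

def pvS (x : List (Int × (Int × Int × Int) × (Int × Int × Int))) : List (Int × (Int × Int × Int)) :=
  PySem.List.sorted (pvL x) (fun t => t.2.2.2)

def pvT (x : List (Int × (Int × Int × Int) × (Int × Int × Int))) :
    List (Int × (Int × Int × Int) × (Int × Int × Int)) :=
  PySem.List.sorted (pvItems x) pvMinZ

theorem pv_minz_mem_zs (be : Int × (Int × Int × Int) × (Int × Int × Int)) :
    ∃ c ∈ pvXmaj be, c.2.2 = pvMinZ be :=
  (pv_xmaj_z_iff be (pvMinZ be)).mpr ⟨le_refl _, min_le_max⟩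

theorem pv_gen_filter_z (be : Int × (Int × Int × Int) × (Int × Int × Int)) (k : Int) :
    (pvGen be).filter (fun t => t.2.2.2 == k) =
      ((pvXmaj be).filter (fun c => c.2.2 == k)).map (fun c => (be.1, c)) := by
  rw [pvGen, List.filter_map]
  rfl

def pvGenRaw (be : Int × (Int × Int × Int) × (Int × Int × Int)) : List (Int × (Int × Int × Int)) :=
  (PySem.List.pyRange (pvMinMax2 be.2.1.1 be.2.2.1).1 ((pvMinMax2 be.2.1.1 be.2.2.1).2 + 1)).flatMap (fun dx =>
    (PySem.List.pyRange (pvMinMax2 be.2.1.2.1 be.2.2.2.1).1 ((pvMinMax2 be.2.1.2.1 be.2.2.2.1).2 + 1)).flatMap (fun dy =>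
      (PySem.List.pyRange (pvMinMax2 be.2.1.2.2 be.2.2.2.2).1 ((pvMinMax2 be.2.1.2.2 be.2.2.2.2).2 + 1)).map (fun dz =>
        (be.1, (dx, dy, dz)))))

theorem pv_genRaw_eq (be : Int × (Int × Int × Int) × (Int × Int × Int)) :
    pvGenRaw be = pvGen be := by
  rw [pvGenRaw, pv_minMax2_eq, pv_minMax2_eq, pv_minMax2_eq, pvGen, pvXmaj]
  simp only [List.map_flatMap, List.map_map]
  rfl

theorem pv_expanded (x : List (Int × (Int × Int × Int) × (Int × Int × Int))) :
    ((pvItems x).foldl (fun acc be => acc ++ pvGenRaw be) []) = pvL x := by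
  rw [PySem.List.foldl_append_eq_flatMap, List.nil_append, pvL]
  exact List.flatMap_congr (fun be _ => pv_genRaw_eq be)

theorem pv_names (x : List (Int × (Int × Int × Int) × (Int × Int × Int))) :
    pvFresh [] ((pvS x).map (fun r => r.1)) = (pvT x).map (fun p => p.1) := by
  have hnd : ((pvItems x).map (fun p => p.1)).Nodup := pv_nodup_keys_ofList x
  have hKlt := PySem.List.sorted_ofList_pairwise_lt ((pvL x).map (fun t => t.2.2.2))
  have hMlt := PySem.List.sorted_ofList_pairwise_lt ((pvItems x).map pvMinZ)
  have hminKs : ∀ be ∈ pvItems x, pvMinZ be ∈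
      PySem.List.sorted (PySem.Set.ofList ((pvL x).map (fun t => t.2.2.2))) (fun v => v) := by
    intro be hbe
    rcases pv_minz_mem_zs be with ⟨c, hc, hz⟩
    rw [(PySem.List.sorted_perm _ _ _).mem_iff, PySem.Set.mem_ofList]
    exact List.mem_map.mpr ⟨(be.1, c), List.mem_flatMap.mpr ⟨be, hbe,
      List.mem_map.mpr ⟨c, hc, rfl⟩⟩, hz⟩
  -- rewrite the name stream into per-z blocks of per-brick constant runs
  have hmapS : (pvS x).map (fun r => r.1) =
      (PySem.List.sorted (PySem.Set.ofList ((pvL x).map (fun t => t.2.2.2))) (fun v => v)).flatMap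
        (fun k => (pvItems x).flatMap
          (fun be => ((pvXmaj be).filter (fun c => c.2.2 == k)).map (fun _ => be.1))) := by
    rw [pvS, pv_canon (pvL x) (fun t => t.2.2.2), List.map_flatMap]
    apply List.flatMap_congr
    intro k _
    rw [pvL, List.filter_flatMap, List.map_flatMap]
    apply List.flatMap_congr
    intro be _
    show ((pvGen be).filter (fun t => t.2.2.2 == k)).map (fun r => r.1) = _
    rw [pv_gen_filter_z, List.map_map]
    rfl
  rw [hmapS, pv_names_loop (pvItems x) hnd _ [] hKlt
    (fun be hbe hm hs => absurd hs (List.not_mem_nil))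
    (fun be hbe hm => absurd (hminKs be hbe) hm)]
  -- identify the two key lists
  have hsub : ∀ m, m ∈ PySem.List.sorted (PySem.Set.ofList ((pvItems x).map pvMinZ)) (fun v => v) →
      m ∈ PySem.List.sorted (PySem.Set.ofList ((pvL x).map (fun t => t.2.2.2))) (fun v => v) := by
    intro m hm
    rw [(PySem.List.sorted_perm _ _ _).mem_iff, PySem.Set.mem_ofList] at hm
    rcases List.mem_map.mp hm with ⟨be, hbe, hbm⟩
    exact hbm ▸ hminKs be hbe
  rw [pv_flatMap_drop_empty _
      (PySem.List.sorted (PySem.Set.ofList ((pvItems x).map pvMinZ)) (fun v => v)) _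
      (by
        intro k _ hk
        rw [List.filter_eq_nil_iff.mpr, List.map_nil]
        intro be hbe
        simp only [beq_iff_eq]
        intro hmz
        exact hk (by
          rw [(PySem.List.sorted_perm _ _ _).mem_iff, PySem.Set.mem_ofList]
          exact List.mem_map.mpr ⟨be, hbe, hmz⟩)),
    pv_strict_sorted_eq _ _ (hKlt.filter _) hMlt (by
      intro m
      rw [List.mem_filter]
      constructor
      · rintro ⟨_, hm⟩
        simpa using hm
      · intro hm
        exact ⟨hsub m hm, by simpa using hm⟩)]
  rw [pvT, pv_canon (pvItems x) pvMinZ, List.map_flatMap]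

theorem pv_vals (x : List (Int × (Int × Int × Int) × (Int × Int × Int)))
    (be : Int × (Int × Int × Int) × (Int × Int × Int)) (hbe : be ∈ pvItems x) :
    ((pvS x).filter (fun r => r.1 == be.1)).map (fun r => r.2) = pvZmaj be := by
  have hnd : ((pvItems x).map (fun p => p.1)).Nodup := pv_nodup_keys_ofList x
  have hLf : (pvL x).filter (fun r => r.1 == be.1) = pvGen be := by
    rw [pvL, List.filter_flatMap]
    rw [show (fun b => (pvGen b).filter (fun r => r.1 == be.1)) =
        (fun b => if b.1 == be.1 then pvGen b else []) from ?_]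
    · exact pv_flatMap_single pvGen (pvItems x) be hnd hbe
    · funext b
      by_cases hb : b.1 == be.1
      · rw [if_pos hb, List.filter_eq_self.mpr]
        intro t ht
        rcases List.mem_map.mp ht with ⟨c, _, hc⟩
        rw [← hc]
        exact hb
      · rw [if_neg hb, List.filter_eq_nil_iff.mpr]
        intro t ht
        rcases List.mem_map.mp ht with ⟨c, _, hc⟩
        rw [← hc]
        exact hb
  rw [pvS, pv_sorted_filter, hLf, pvGen,
    pv_sorted_map (fun c => (be.1, c)) (fun t => t.2.2.2) (pvXmaj be)]
  rw [show (fun a => ((be.1, a) : Int × (Int × Int × Int)).2.2.2) =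
    (fun c : Int × Int × Int => c.2.2) from rfl, pv_sorted_xmaj, List.map_map]
  simp

theorem pv_main (brick_edges : List (Int × (Int × Int × Int) × (Int × Int × Int))) :
    build_bricks brick_edges = build_bricks_alt brick_edges := by
  have hnd : ((pvItems brick_edges).map (fun p => p.1)).Nodup := pv_nodup_keys_ofList brick_edges
  have hndT : ((pvT brick_edges).map (fun p => p.1)).Nodup :=
    (((PySem.List.sorted_perm (pvItems brick_edges) pvMinZ false).map (fun p => p.1)).nodup_iff).mpr hnd
  have hA : build_bricks brick_edges =
      ((PySem.List.sorted ((pvItems brick_edges).foldl (fun acc be => acc ++ pvGenRaw be) [])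
          (fun t => t.2.2.2)).foldl
        (fun d p => d.modify p.1 [] (fun l => l ++ [p.2])) PySem.Dict.empty).items := rfl
  have hB : build_bricks_alt brick_edges =
      ((pvT brick_edges).foldl (fun acc be => acc.insert be.1 (pvZmaj be)) PySem.Dict.empty).items := rfl
  rw [hA, hB, pv_expanded brick_edges,
    show PySem.List.sorted (pvL brick_edges) (fun t => t.2.2.2) = pvS brick_edges from rfl,
    pv_group_inv (pvS brick_edges) PySem.Dict.empty (by simp [PySem.Dict.empty])]
  simp only [show (PySem.Dict.empty : PySem.Dict Int (List (Int × Int × Int))).items = [] from rfl,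
    List.map_nil, List.nil_append]
  rw [pv_names,
    pv_items_foldl_insert (fun be => pvZmaj be) (pvT brick_edges) PySem.Dict.empty
      (fun be _ => by simp [PySem.Dict.contains, PySem.Dict.empty]) hndT]
  simp only [show (PySem.Dict.empty : PySem.Dict Int (List (Int × Int × Int))).items = [] from rfl,
    List.nil_append, List.map_map]
  apply List.map_congr_left
  intro be hbe
  have hbe' : be ∈ pvItems brick_edges := (PySem.List.sorted_perm _ _ _).mem_iff.mp hbe
  simp only [Function.comp]
  rw [pv_vals brick_edges be hbe']

-- ===== VERDICT (by name: the statement is the Claim_ definition above) =====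
theorem build_bricks_spec : Claim_equal_build_bricks := by
  intro brick_edges _
  unfold Spec_build_bricks
  exact pv_main brick_edges
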